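-- pv_equiv track=rewrite | github.com/insoo00/Algorithm | programmers/pccp/1/3.py | solution
-- ===== SOURCE A (Python) =====
-- from collections import deque
--
-- def solution(queries):
--     answer = []
--
--     for query in queries:
--         info = deque()
--         gen = query[0]-1
--         pea = query[1]-1
--         while gen>0:
--             info.appendleft([pea//4, pea%4])
--             gen -= 1
--             pea = pea//4
--
--         result = deque(["Rr"])
--         for i in range(len(info)):
--             if result[i] == "RR":
--                 result.append("RR")
--             elif result[i] == "rr":
--                 result.append("rr")
--             else:
--                 if info[i][1] == 0:
--                     result.append("RR")
--                 elif info[i][1] == 3: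
--                     result.append("rr")
--                 else:
--                     result.append("Rr")
--         answer.append(result.pop())
--     return answer
-- ===== SOURCE B (Python) =====
-- def solution(queries):
--     answer = []
--     for query in queries:
--         gen = query[0] - 1
--         pea = query[1] - 1
--         res = "Rr"
--         for k in range(gen - 1, -1, -1):
--             d = (pea // (4 ** k)) % 4
--             if d == 0:
--                 res = "RR"
--                 break
--             if d == 3:
--                 res = "rr"
--                 break
--         answer.append(res)
--     return answer
-- ===== Notes on version B (the rewrite author's own statement) =====
-- stated objective: simpler
-- what changed: A builds a deque of base-4 digit pairs with a while loop and then propagates a genotype state along it with a second indexed pass over a growing result deque; B does one early-exit scan over digit positions from most significant to least, returning at the first decisive digit (0 -> 'RR', 3 -> 'rr').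
import Mathlib
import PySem

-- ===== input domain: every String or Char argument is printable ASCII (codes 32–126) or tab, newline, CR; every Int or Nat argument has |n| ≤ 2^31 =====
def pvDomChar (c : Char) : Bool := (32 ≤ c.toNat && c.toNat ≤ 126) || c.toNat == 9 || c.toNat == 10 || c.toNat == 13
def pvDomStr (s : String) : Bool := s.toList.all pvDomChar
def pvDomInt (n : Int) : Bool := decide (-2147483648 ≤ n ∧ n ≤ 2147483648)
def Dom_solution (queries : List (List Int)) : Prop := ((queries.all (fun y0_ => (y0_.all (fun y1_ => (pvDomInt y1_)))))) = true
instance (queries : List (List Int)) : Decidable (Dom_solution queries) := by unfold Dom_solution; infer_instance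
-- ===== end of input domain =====

-- B replaces A's per-query two-pass structure (build an info deque of digit pairs, then
-- propagate a genotype state along it with an indexed result deque) by a single
-- most-significant-first early-exit digit scan (objective: simpler).

-- ===== PORT A =====
-- the 'while gen>0' loop: info.appendleft([pea//4, pea%4]); gen -= 1; pea = pea//4
def pvInfoLoop (gen pea : Int) (info : List (Int × Int)) : List (Int × Int) :=
  if _h : gen > 0 then
    pvInfoLoop (gen - 1) (PySem.Int.floordiv pea 4)
      ((PySem.Int.floordiv pea 4, PySem.Int.mod pea 4) :: info)
  else info
  termination_by gen.toNat
  decreasing_by omega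

-- the body of A's 'for query in queries' loop; on Pre_ inputs every pyGet? below is in
-- range, so the .getD defaults are never taken
def pvQueryA (query : List Int) : String :=
  let gen := (PySem.List.pyGet? query 0).getD 0 - 1
  let pea := (PySem.List.pyGet? query 1).getD 0 - 1
  let info := pvInfoLoop gen pea []
  let result := (PySem.List.pyRange 0 (info.length : Int) 1).foldl (fun result j =>
    let ri := (PySem.List.pyGet? result j).getD ""
    if ri = "RR" then result ++ ["RR"]
    else if ri = "rr" then result ++ ["rr"]
    else
      let d := ((PySem.List.pyGet? info j).getD (0, 0)).2
      if d = 0 then result ++ ["RR"]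
      else if d = 3 then result ++ ["rr"]
      else result ++ ["Rr"]) ["Rr"]
  (result.getLast?).getD ""

def solution (queries : List (List Int)) : List String :=
  queries.foldl (fun answer query => answer ++ [pvQueryA query]) []

-- ===== PORT B =====
-- the 'for k in range(gen-1, -1, -1)' early-exit loop of Source B; every k this range
-- produces is ≥ 0, so Python's '4 ** k' is exactly (4 : Int) ^ k.toNat
def pvScan (ks : List Int) (pea : Int) : String :=
  match ks with
  | [] => "Rr"
  | k :: ks' =>
    let d := PySem.Int.mod (PySem.Int.floordiv pea ((4 : Int) ^ k.toNat)) 4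
    if d = 0 then "RR" else if d = 3 then "rr" else pvScan ks' pea

def pvQueryB (query : List Int) : String :=
  let gen := (PySem.List.pyGet? query 0).getD 0 - 1
  let pea := (PySem.List.pyGet? query 1).getD 0 - 1
  pvScan (PySem.List.pyRange (gen - 1) (-1) (-1)) pea

def solution_alt (queries : List (List Int)) : List String :=
  queries.foldl (fun answer query => answer ++ [pvQueryB query]) []

-- ===== PRECONDITION & SPEC =====
-- A raises IndexError on query[0]/query[1] when a query has fewer than two entries
def Pre_solution (queries : List (List Int)) : Prop := ∀ q ∈ queries, 2 ≤ q.length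
instance (queries : List (List Int)) : Decidable (Pre_solution queries) := by
  unfold Pre_solution; infer_instance

def pvWitness_solution : List (List Int) := [[3, 5], [1, 1], [4, 26]]

def Spec_solution (queries : List (List Int)) (out : List String) : Prop := out = solution_alt queries
instance (queries : List (List Int)) (out : List String) : Decidable (Spec_solution queries out) := by unfold Spec_solution; infer_instance

-- ===== CLAIM (what is proved, stated in full; the proofs are below) =====
def Claim_equal_solution : Prop := ∀ (queries : List (List Int)), Dom_solution queries → Pre_solution queries → Spec_solution queries (solution queries)

-- ===== LEMMAS AND PROOFS =====

-- the state update of A's result-propagation loop, as a function of the previous state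
-- and the current info pair
def pvStepFun (r : String) (d : Int × Int) : String :=
  if r = "RR" then "RR" else if r = "rr" then "rr"
  else if d.2 = 0 then "RR" else if d.2 = 3 then "rr" else "Rr"

-- early-exit reading of the propagation: first pair with second component 0 or 3 decides
def pvEarly (l : List (Int × Int)) : String :=
  match l with
  | [] => "Rr"
  | d :: ds => if d.2 = 0 then "RR" else if d.2 = 3 then "rr" else pvEarly ds

-- the base-4 digit pair A's while-loop stores for digit position k
def pvDigitPair (pea : Int) (k : Nat) : Int × Int :=
  (PySem.Int.floordiv pea ((4 : Int) ^ (k + 1)),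
   PySem.Int.mod (PySem.Int.floordiv pea ((4 : Int) ^ k)) 4)

lemma pvFdivFdiv (a : Int) (m : Nat) :
    PySem.Int.floordiv (PySem.Int.floordiv a 4) ((4 : Int) ^ m) =
      PySem.Int.floordiv a ((4 : Int) ^ (m + 1)) := by
  rw [PySem.Int.floordiv_eq_ediv_of_pos (by norm_num),
      PySem.Int.floordiv_eq_ediv_of_pos (by positivity),
      PySem.Int.floordiv_eq_ediv_of_pos (by positivity),
      Int.ediv_ediv_of_nonneg (by norm_num), pow_succ']

lemma pvRevRangeMapSucc {α : Type} (f : Nat → α) (g : Nat) :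
    (List.range (g + 1)).reverse.map f =
      (List.range g).reverse.map (fun k => f (k + 1)) ++ [f 0] := by
  induction g with
  | zero => simp
  | succ g ih =>
    have h1 : (List.range (g + 1 + 1)).reverse = (g + 1) :: (List.range (g + 1)).reverse := by
      rw [List.range_succ]; simp
    have h2 : (List.range (g + 1)).reverse = g :: (List.range g).reverse := by
      rw [List.range_succ]; simp
    rw [h1, List.map_cons, ih, h2, List.map_cons]
    simp

lemma pvInfoLoopEq (g : Nat) : ∀ (pea : Int) (acc : List (Int × Int)),
    pvInfoLoop (g : Int) pea acc = (List.range g).reverse.map (pvDigitPair pea) ++ acc := by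
  induction g with
  | zero => intro pea acc; rw [pvInfoLoop]; simp
  | succ g ih =>
    intro pea acc
    rw [pvInfoLoop]
    rw [dif_pos (by exact_mod_cast Nat.succ_pos g)]
    have hc : ((g : Int) + 1) - 1 = (g : Int) := by ring
    simp only [Nat.cast_succ, hc]
    rw [ih]
    rw [pvRevRangeMapSucc (pvDigitPair pea) g]
    have hmap : (List.range g).reverse.map (pvDigitPair (PySem.Int.floordiv pea 4)) =
        (List.range g).reverse.map (fun k => pvDigitPair pea (k + 1)) := by
      apply List.map_congr_left
      intro k _
      simp only [pvDigitPair, pvFdivFdiv]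
    rw [hmap]
    simp [pvDigitPair, PySem.Int.floordiv_eq_ediv_of_pos, pow_zero]

-- absorption: once the state is "RR" or "rr" it never changes
lemma pvFoldRR (l : List (Int × Int)) : l.foldl pvStepFun "RR" = "RR" := by
  induction l with
  | nil => rfl
  | cons d l ih => simpa [pvStepFun] using ih

lemma pvFoldrr (l : List (Int × Int)) : l.foldl pvStepFun "rr" = "rr" := by
  induction l with
  | nil => rfl
  | cons d l ih => simpa [pvStepFun] using ih

lemma pvFoldEarly (l : List (Int × Int)) : l.foldl pvStepFun "Rr" = pvEarly l := by
  induction l with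
  | nil => rfl
  | cons d l ih =>
    simp only [List.foldl_cons, pvEarly]
    by_cases h0 : d.2 = 0
    · simp [pvStepFun, h0, pvFoldRR]
    · by_cases h3 : d.2 = 3
      · simp [pvStepFun, h3, pvFoldrr]
      · simp [pvStepFun, h0, h3, ih]

lemma pvScanlLast {α β : Type} (f : β → α → β) (l : List α) : ∀ (b : β),
    (List.scanl f b l)[l.length]? = some (List.foldl f b l) := by
  induction l with
  | nil => intro b; rfl
  | cons a l ih => intro b; simpa [List.scanl] using ih (f b a)

-- A's indexed result-building loop produces the scanl of pvStepFun
lemma pvLoopInv (info : List (Int × Int)) : ∀ (n i : Nat), i + n = info.length →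
    (PySem.List.pyRange (i : Int) (info.length : Int) 1).foldl (fun result j =>
      if (PySem.List.pyGet? result j).getD "" = "RR" then result ++ ["RR"]
      else if (PySem.List.pyGet? result j).getD "" = "rr" then result ++ ["rr"]
      else if ((PySem.List.pyGet? info j).getD (0, 0)).2 = 0 then result ++ ["RR"]
      else if ((PySem.List.pyGet? info j).getD (0, 0)).2 = 3 then result ++ ["rr"]
      else result ++ ["Rr"]) (List.scanl pvStepFun "Rr" (info.take i)) =
    List.scanl pvStepFun "Rr" info := by
  intro n
  induction n with
  | zero =>
    intro i h
    have hi : i = info.length := by omega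
    subst hi
    rw [PySem.List.pyRange_one_eq_nil (le_refl _), List.foldl_nil,
      List.take_of_length_le (le_refl _)]
  | succ n ih =>
    intro i h
    have hi : i < info.length := by omega
    rw [PySem.List.pyRange_one_cons (by exact_mod_cast hi), List.foldl_cons]
    have htake : (info.take i).length = i := by simp; omega
    have hri : (PySem.List.pyGet? (List.scanl pvStepFun "Rr" (info.take i)) (i : Int)).getD ""
        = List.foldl pvStepFun "Rr" (info.take i) := by
      rw [PySem.List.pyGet?_natCast]
      rw [show (List.scanl pvStepFun "Rr" (info.take i))[i]? =
          (List.scanl pvStepFun "Rr" (info.take i))[(info.take i).length]? by rw [htake]]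
      rw [pvScanlLast]
      rfl
    have hd : (PySem.List.pyGet? info (i : Int)).getD (0, 0) = info[i] := by
      rw [PySem.List.pyGet?_natCast, List.getElem?_eq_getElem hi]
      rfl
    have hstep :
        (if (PySem.List.pyGet? (List.scanl pvStepFun "Rr" (info.take i)) (i : Int)).getD ""
            = "RR" then List.scanl pvStepFun "Rr" (info.take i) ++ ["RR"]
        else if (PySem.List.pyGet? (List.scanl pvStepFun "Rr" (info.take i)) (i : Int)).getD ""
            = "rr" then List.scanl pvStepFun "Rr" (info.take i) ++ ["rr"]
        else if ((PySem.List.pyGet? info (i : Int)).getD (0, 0)).2 = 0 then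
          List.scanl pvStepFun "Rr" (info.take i) ++ ["RR"]
        else if ((PySem.List.pyGet? info (i : Int)).getD (0, 0)).2 = 3 then
          List.scanl pvStepFun "Rr" (info.take i) ++ ["rr"]
        else List.scanl pvStepFun "Rr" (info.take i) ++ ["Rr"]) =
        List.scanl pvStepFun "Rr" (info.take (i + 1)) := by
      rw [hri, hd, List.take_succ_eq_append_getElem hi, List.scanl_append]
      simp only [List.scanl_cons, List.scanl_nil, List.tail_cons]
      simp only [pvStepFun]
      split_ifs <;> rfl
    rw [hstep]
    have hcast : ((i : Int) + 1) = (((i + 1 : Nat)) : Int) := by push_cast; ring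
    rw [hcast]
    exact ih (i + 1) (by omega)

-- B's early-exit scan over cast indices is pvEarly of the digit pairs
lemma pvScanEq (pea : Int) (ks : List Nat) :
    pvScan (List.map (fun k : Nat => (k : Int)) ks) pea =
      pvEarly (List.map (pvDigitPair pea) ks) := by
  induction ks with
  | nil => rfl
  | cons k ks ih =>
    rw [List.map_cons, List.map_cons,
      show pvScan ((k : Int) :: List.map (fun k : Nat => (k : Int)) ks) pea =
        (if PySem.Int.mod (PySem.Int.floordiv pea ((4 : Int) ^ ((k : Int)).toNat)) 4 = 0
          then "RR"
          else if PySem.Int.mod (PySem.Int.floordiv pea ((4 : Int) ^ ((k : Int)).toNat)) 4 = 3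
          then "rr" else pvScan (List.map (fun k : Nat => (k : Int)) ks) pea) from rfl]
    simp only [Int.toNat_natCast]
    rw [show pvEarly (pvDigitPair pea k :: List.map (pvDigitPair pea) ks) =
        (if (pvDigitPair pea k).2 = 0 then "RR"
         else if (pvDigitPair pea k).2 = 3 then "rr"
         else pvEarly (List.map (pvDigitPair pea) ks)) from rfl]
    simp only [pvDigitPair]
    split_ifs <;> first | rfl | exact ih

lemma pvRangeRevCast (g : Nat) :
    List.map (fun k : Nat => ((g : Int) - 1 - (k : Int))) (List.range g) =
      List.map (fun k : Nat => (k : Int)) (List.range g).reverse := by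
  induction g with
  | zero => rfl
  | succ g ih =>
    have h2 : (List.range (g + 1)).reverse = g :: (List.range g).reverse := by
      rw [List.range_succ]; simp
    rw [h2, List.range_succ_eq_map, List.map_cons, List.map_cons, List.map_map]
    congr 1
    · push_cast; ring
    · rw [← ih]
      apply List.map_congr_left
      intro k _
      simp only [Function.comp]
      push_cast; ring

-- per-query equality
lemma pvQueryEq (q : List Int) : pvQueryA q = pvQueryB q := by
  simp only [pvQueryA, pvQueryB]
  generalize (PySem.List.pyGet? q 0).getD 0 - 1 = gen
  generalize (PySem.List.pyGet? q 1).getD 0 - 1 = pea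
  have hres := pvLoopInv (pvInfoLoop gen pea []) (pvInfoLoop gen pea []).length 0 (by omega)
  simp only [List.take_zero, List.scanl_nil, Nat.cast_zero] at hres
  rw [hres, List.getLast?_scanl, Option.getD_some, pvFoldEarly]
  by_cases hg : 0 ≤ gen
  · obtain ⟨g, rfl⟩ : ∃ g : Nat, gen = (g : Int) := ⟨gen.toNat, (Int.toNat_of_nonneg hg).symm⟩
    rw [pvInfoLoopEq g pea [], List.append_nil]
    rw [PySem.List.pyRange_neg_one]
    rw [show (((g : Int) - 1) - (-1)).toNat = g by omega]
    rw [show (fun k : Nat => ((g : Int) - 1 - (k : Int))) =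
        (fun k : Nat => ((g : Int) - 1 - (k : Int))) from rfl]
    rw [pvRangeRevCast, pvScanEq]
  · rw [show pvInfoLoop gen pea [] = [] from by rw [pvInfoLoop]; exact dif_neg (by omega)]
    rw [PySem.List.pyRange_neg_one_eq_nil (by omega)]
    rfl

-- ===== VERDICT (by name: the statement is the Claim_ definition above) =====
theorem solution_spec : Claim_equal_solution := by
  intro queries _ _
  unfold Spec_solution solution solution_alt
  rw [PySem.List.foldl_append_singleton_eq_map, PySem.List.foldl_append_singleton_eq_map]
  exact congrArg _ (List.map_congr_left (fun q _ => pvQueryEq q))
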